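-- pv_equiv track=rewrite | github.com/Krandheer/data-structure | leetcode_contest.py | find_score
-- ===== SOURCE A (Python) =====
-- import heapq
-- from typing import List
--
-- def find_score(nums: List[int]) -> int:
--     marked = [False] * len(nums)
--     ans = 0
--     heap = []
--     for i, num in enumerate(nums):
--         heapq.heappush(heap, (num, i))
--     while heap:
--         num, i = heapq.heappop(heap)
--         if not marked[i]:
--             ans += num
--             marked[i] = True
--             if i - 1 >= 0:
--                 marked[i - 1] = True
--             if i + 1 < len(nums):
--                 marked[i + 1] = True
--     return ans
-- ===== SOURCE B (Python) =====
-- def find_score(nums):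
--     # Divide and conquer on the global minimum: the smallest value (first one on
--     # ties) is always taken and splits the array into two independent segments,
--     # processed with an explicit segment stack (no heap, no sort, no marked array).
--     ans = 0
--     stack = [(0, len(nums))]
--     while stack:
--         lo, hi = stack.pop()
--         if lo >= hi:
--             continue
--         i = lo
--         for j in range(lo + 1, hi):
--             if nums[j] < nums[i]:
--                 i = j
--         ans += nums[i]
--         stack.append((lo, i - 1))
--         stack.append((i + 2, hi))
--     return ans
-- ===== Notes on version B (the rewrite author's own statement) =====
-- stated objective: alternative
-- what changed: Replaces the heap-driven greedy (push all (num,i), pop minima, skip marked) by divide and conquer on the global minimum: the first minimum of a segment is always taken and splits it into two independent sub-segments, processed with an explicit segment stack; no heap, no sort and no marked array remain.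
import Mathlib
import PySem

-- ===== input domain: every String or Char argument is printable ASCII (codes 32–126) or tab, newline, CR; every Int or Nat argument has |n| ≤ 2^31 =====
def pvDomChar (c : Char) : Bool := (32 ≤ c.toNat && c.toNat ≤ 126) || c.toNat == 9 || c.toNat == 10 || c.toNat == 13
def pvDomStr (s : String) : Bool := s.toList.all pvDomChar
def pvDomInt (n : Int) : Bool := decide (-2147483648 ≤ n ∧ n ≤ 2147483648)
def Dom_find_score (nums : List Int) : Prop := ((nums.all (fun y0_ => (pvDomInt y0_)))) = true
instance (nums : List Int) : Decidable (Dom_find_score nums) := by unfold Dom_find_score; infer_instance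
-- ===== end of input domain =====

-- B replaces the heap-greedy by divide and conquer on the global minimum (explicit segment
-- stack, no heap, no sort, no marked array): an alternative algorithm of similar cost.

-- ===== PORT A =====
-- heapq on tuples is modelled as a min-priority queue kept as a lexicographically
-- sorted list: heappush = ordered insert, heappop = take the head.  This has exactly
-- heapq's observable push/pop behaviour ((num, i) pairs compare lexicographically and
-- are pairwise distinct, so pop order is fully determined).
def pvHeapPush (heap : List (Int × Int)) (x : Int × Int) : List (Int × Int) :=
  PySem.List.insertBy (fun a b => decide (toLex a < toLex b)) x heap

-- the 'while heap:' loop: pop the minimum, process it, recurse on the rest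
def pvDrain (nums : List Int) : List (Int × Int) → List Bool → Int → Int
  | [], _, ans => ans
  | (num, i) :: rest, marked, ans =>
    if !(PySem.List.pyGetD marked i false) then
      -- indices written here are produced by enumerate and guarded nonnegative, so
      -- List.set at .toNat is exact for Python's marked[...] = True
      let marked := marked.set i.toNat true
      let marked := if 0 ≤ i - 1 then marked.set (i - 1).toNat true else marked
      let marked := if i + 1 < (nums.length : Int) then marked.set (i + 1).toNat true else marked
      pvDrain nums rest marked (ans + num)
    else
      pvDrain nums rest marked ans

def find_score (nums : List Int) : Int :=
  let marked : List Bool := List.replicate nums.length false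
  let ans : Int := 0
  let heap : List (Int × Int) := []
  let heap := (PySem.List.enumerate nums 0).foldl (fun h p => pvHeapPush h (p.2, p.1)) heap
  pvDrain nums heap marked ans

-- ===== PORT B =====
-- nums[j]: every access B makes is at an in-range nonnegative index, so pyGetD is exact
def pvGetI (nums : List Int) (j : Int) : Int := PySem.List.pyGetD nums j 0

-- body of the 'for j in range(lo+1, hi)' argmin scan
def pvMinStep (nums : List Int) (i j : Int) : Int :=
  if pvGetI nums j < pvGetI nums i then j else i

-- i = lo; for j in range(lo+1, hi): if nums[j] < nums[i]: i = j
def pvArgmin (nums : List Int) (lo hi : Int) : Int :=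
  (PySem.List.pyRange (lo + 1) hi 1).foldl (pvMinStep nums) lo

-- the scan returns the lex-least (value, index) over {acc} ∪ [a, b); needed (via
-- pvArgmin_bounds) for the termination of the port's stack loop
theorem pvFoldMin_spec (nums : List Int) (b : Int) : ∀ (n : Nat) (a acc : Int),
    (b - a).toNat = n → acc < a →
    (((PySem.List.pyRange a b 1).foldl (pvMinStep nums) acc = acc ∨
      (a ≤ (PySem.List.pyRange a b 1).foldl (pvMinStep nums) acc ∧
       (PySem.List.pyRange a b 1).foldl (pvMinStep nums) acc < b)) ∧
     (∀ j : Int, (j = acc ∨ (a ≤ j ∧ j < b)) →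
       toLex (pvGetI nums ((PySem.List.pyRange a b 1).foldl (pvMinStep nums) acc),
              (PySem.List.pyRange a b 1).foldl (pvMinStep nums) acc) ≤
       toLex (pvGetI nums j, j))) := by
  intro n
  induction n with
  | zero =>
    intro a acc h0 hacc
    rw [PySem.List.pyRange_one_eq_nil (by omega)]
    refine ⟨Or.inl rfl, ?_⟩
    intro j hj
    rcases hj with rfl | ⟨h1, h2⟩
    · exact le_refl _
    · omega
  | succ n ih =>
    intro a acc hn hacc
    have hab : a < b := by omega
    rw [PySem.List.pyRange_one_cons hab]
    simp only [List.foldl_cons]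
    obtain ⟨hloc, hmin⟩ := ih (a + 1) (pvMinStep nums acc a)
      (by omega) (by unfold pvMinStep; split <;> omega)
    by_cases hc : pvGetI nums a < pvGetI nums acc
    · have hstep : pvMinStep nums acc a = a := by simp [pvMinStep, hc]
      rw [hstep] at hloc hmin ⊢
      refine ⟨?_, ?_⟩
      · rcases hloc with h | h
        · right; rw [h]; omega
        · right; omega
      · intro j hj
        have hle_a : toLex (pvGetI nums a, a) ≤ toLex (pvGetI nums acc, acc) :=
          Prod.Lex.le_iff.mpr (Or.inl hc)
        rcases hj with rfl | ⟨h1, h2⟩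
        · exact le_trans (hmin a (Or.inl rfl)) hle_a
        · rcases eq_or_lt_of_le h1 with h1' | h1'
          · rw [← h1']; exact hmin a (Or.inl rfl)
          · exact hmin j (Or.inr ⟨by omega, h2⟩)
    · have hstep : pvMinStep nums acc a = acc := by simp [pvMinStep, hc]
      rw [hstep] at hloc hmin ⊢
      refine ⟨?_, ?_⟩
      · rcases hloc with h | h
        · left; exact h
        · right; omega
      · intro j hj
        have hle_acc : toLex (pvGetI nums acc, acc) ≤ toLex (pvGetI nums a, a) := by
          rcases lt_or_eq_of_le (not_lt.mp hc) with h' | h'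
          · exact Prod.Lex.le_iff.mpr (Or.inl h')
          · exact Prod.Lex.le_iff.mpr (Or.inr ⟨h', le_of_lt hacc⟩)
        rcases hj with rfl | ⟨h1, h2⟩
        · exact hmin _ (Or.inl rfl)
        · rcases eq_or_lt_of_le h1 with h1' | h1'
          · rw [← h1']; exact le_trans (hmin _ (Or.inl rfl)) hle_acc
          · exact hmin j (Or.inr ⟨by omega, h2⟩)

theorem pvArgmin_bounds (nums : List Int) (lo hi : Int) (h : lo < hi) :
    lo ≤ pvArgmin nums lo hi ∧ pvArgmin nums lo hi < hi := by
  obtain ⟨hloc, _⟩ := pvFoldMin_spec nums hi (hi - (lo + 1)).toNat (lo + 1) lo rfl (by omega)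
  unfold pvArgmin
  rcases hloc with h' | h' <;> omega

-- the 'while stack:' loop; Python pops/pushes at the END of the list, modelled here with
-- the head of the Lean list as the top of the stack (the two appends therefore cons in
-- reverse order: the segment appended last is popped first)
def pvLoop (nums : List Int) : List (Int × Int) → Int → Int
  | [], ans => ans
  | (lo, hi) :: rest, ans =>
    if lo ≥ hi then pvLoop nums rest ans
    else
      let i := pvArgmin nums lo hi
      pvLoop nums ((i + 2, hi) :: (lo, i - 1) :: rest) (ans + pvGetI nums i)
termination_by stack => (stack.map (fun s => 2 * (s.2 - s.1).toNat + 1)).sum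
decreasing_by
  all_goals
    first
      | (simp only [List.map_cons, List.sum_cons]; omega)
      | (have hb := pvArgmin_bounds nums lo hi (by omega)
         simp only [List.map_cons, List.sum_cons]; omega)

def find_score_alt (nums : List Int) : Int :=
  pvLoop nums [(0, (nums.length : Int))] 0

-- ===== PRECONDITION & SPEC =====
def Spec_find_score (nums : List Int) (out : Int) : Prop := out = find_score_alt nums
instance (nums : List Int) (out : Int) : Decidable (Spec_find_score nums out) := by unfold Spec_find_score; infer_instance

-- ===== CLAIM (what is proved, stated in full; the proofs are below) =====
def Claim_equal_find_score : Prop := ∀ (nums : List Int), Dom_find_score nums → Spec_find_score nums (find_score nums)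

-- ===== LEMMAS AND PROOFS =====

-- abstract greedy over a set of marked indices (proof-side model of A's drain loop)
def pvGreedy : List (Int × Int) → Finset Int → Int
  | [], _ => 0
  | (v, i) :: rest, M =>
    if i ∈ M then pvGreedy rest M
    else v + pvGreedy rest (insert (i - 1) (insert i (insert (i + 1) M)))

-- proof-side recursive divide-and-conquer score of the segment [lo, hi)
def pvDC (nums : List Int) (lo hi : Int) : Int :=
  if lo ≥ hi then 0
  else
    let i := pvArgmin nums lo hi
    pvGetI nums i + (pvDC nums lo (i - 1) + pvDC nums (i + 2) hi)
termination_by (hi - lo).toNat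
decreasing_by
  · have hb := pvArgmin_bounds nums lo hi (by omega); omega
  · have hb := pvArgmin_bounds nums lo hi (by omega); omega

-- the queue built by A's push loop IS the lex-sorted pair table
theorem pvHeap_eq_sorted (nums : List Int) :
    (PySem.List.enumerate nums 0).foldl (fun h p => pvHeapPush h (p.2, p.1)) [] =
    PySem.List.sorted ((PySem.List.enumerate nums 0).map (fun p => (p.2, p.1))) (fun p => toLex p) false := by
  rw [PySem.List.sorted_eq_foldl_insertBy, List.foldl_map]
  rfl


-- marking congruence: only membership of the pair indices matters
theorem pvGreedy_congr (l : List (Int × Int)) : ∀ (M M' : Finset Int),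
    (∀ p ∈ l, (p.2 ∈ M ↔ p.2 ∈ M')) → pvGreedy l M = pvGreedy l M' := by
  induction l with
  | nil => intros; rfl
  | cons p t ih =>
    obtain ⟨v, i⟩ := p
    intro M M' h
    have hi := h (v, i) (List.mem_cons_self ..)
    simp only [pvGreedy]
    by_cases hM : i ∈ M
    · rw [if_pos hM, if_pos (hi.mp hM)]
      exact ih _ _ (fun p hp => h p (List.mem_cons_of_mem _ hp))
    · rw [if_neg hM, if_neg (hM ∘ hi.mpr)]
      congr 1
      apply ih
      intro p hp
      simp only [Finset.mem_insert]
      have := h p (List.mem_cons_of_mem _ hp)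
      tauto

-- pairs whose index is already (and stays) marked never contribute: drop them
theorem pvGreedy_filter (M₀ : Finset Int) (l : List (Int × Int)) : ∀ (M : Finset Int), M₀ ⊆ M →
    pvGreedy l M = pvGreedy (l.filter (fun p => decide (p.2 ∉ M₀))) M := by
  induction l with
  | nil => intros; rfl
  | cons p t ih =>
    obtain ⟨v, i⟩ := p
    intro M hsub
    by_cases h0 : i ∈ M₀
    · rw [List.filter_cons_of_neg (by simp [h0])]
      simp only [pvGreedy, if_pos (hsub h0)]
      exact ih M hsub
    · rw [List.filter_cons_of_pos (by simp [h0])]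
      simp only [pvGreedy]
      by_cases hM : i ∈ M
      · rw [if_pos hM, if_pos hM]; exact ih M hsub
      · rw [if_neg hM, if_neg hM]
        congr 1
        exact ih _ (fun x hx => by
          simp only [Finset.mem_insert]
          exact Or.inr (Or.inr (Or.inr (hsub hx))))

-- independence: pairs on two index ranges ≥ 2 apart never mark across, so the
-- greedy sum splits
theorem pvGreedy_split (A B : Int → Bool)
    (sep : ∀ x : Int, A x = true → B (x - 1) = false ∧ B x = false ∧ B (x + 1) = false)
    (l : List (Int × Int)) : ∀ (MA MB : Finset Int),
    (∀ p ∈ l, A p.2 = true ∨ B p.2 = true) →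
    (∀ j, B j = true → j ∉ MA) → (∀ j, A j = true → j ∉ MB) →
    pvGreedy l (MA ∪ MB) =
      pvGreedy (l.filter (fun p => A p.2)) MA + pvGreedy (l.filter (fun p => B p.2)) MB := by
  have sep' : ∀ x : Int, B x = true → A (x - 1) = false ∧ A x = false ∧ A (x + 1) = false := by
    intro x hB
    refine ⟨?_, ?_, ?_⟩
    · cases hA : A (x - 1) with
      | false => rfl
      | true =>
        have h2 := (sep _ hA).2.2
        rw [sub_add_cancel, hB] at h2
        cases h2
    · cases hA : A x with
      | false => rfl
      | true =>
        have h2 := (sep _ hA).2.1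
        rw [hB] at h2
        cases h2
    · cases hA : A (x + 1) with
      | false => rfl
      | true =>
        have h2 := (sep _ hA).1
        rw [add_sub_cancel_right, hB] at h2
        cases h2
  induction l with
  | nil => intros; rfl
  | cons p t ih =>
    obtain ⟨v, i⟩ := p
    intro MA MB hl hMA hMB
    rcases hl (v, i) (List.mem_cons_self ..) with hA | hB
    · have hBi : B i = false := (sep i hA).2.1
      rw [List.filter_cons_of_pos (by simpa using hA), List.filter_cons_of_neg (by simp [hBi])]
      simp only [pvGreedy]
      have hiMB : i ∉ MB := hMB i hA
      by_cases hMAi : i ∈ MA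
      · rw [if_pos (Finset.mem_union_left _ hMAi), if_pos hMAi]
        exact ih _ _ (fun p hp => hl p (List.mem_cons_of_mem _ hp)) hMA hMB
      · rw [if_neg (by simp [Finset.mem_union, hMAi, hiMB]), if_neg hMAi]
        have hrw : insert (i - 1) (insert i (insert (i + 1) (MA ∪ MB))) =
            insert (i - 1) (insert i (insert (i + 1) MA)) ∪ MB := by
          simp [Finset.insert_union]
        rw [hrw, ih _ _ (fun p hp => hl p (List.mem_cons_of_mem _ hp)) ?_ hMB]
        · omega
        · intro j hj
          simp only [Finset.mem_insert]
          push Not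
          have hs := sep i hA
          refine ⟨?_, ?_, ?_, hMA j hj⟩ <;> rintro rfl <;> simp_all
    · have hAi : A i = false := (sep' i hB).2.1
      rw [List.filter_cons_of_neg (by simp [hAi]), List.filter_cons_of_pos (by simpa using hB)]
      simp only [pvGreedy]
      have hiMA : i ∉ MA := hMA i hB
      by_cases hMBi : i ∈ MB
      · rw [if_pos (Finset.mem_union_right _ hMBi), if_pos hMBi]
        exact ih _ _ (fun p hp => hl p (List.mem_cons_of_mem _ hp)) hMA hMB
      · rw [if_neg (by simp [Finset.mem_union, hiMA, hMBi]), if_neg hMBi]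
        have hrw : insert (i - 1) (insert i (insert (i + 1) (MA ∪ MB))) =
            MA ∪ insert (i - 1) (insert i (insert (i + 1) MB)) := by
          simp [Finset.union_insert]
        rw [hrw, ih _ _ (fun p hp => hl p (List.mem_cons_of_mem _ hp)) hMA ?_]
        · omega
        · intro j hj
          simp only [Finset.mem_insert]
          push Not
          have hs := sep' i hB
          refine ⟨?_, ?_, ?_, hMB j hj⟩ <;> rintro rfl <;> simp_all


-- the greedy over ANY strictly lex-sorted pair list of the segment [lo, hi) is the
-- divide-and-conquer score of that segment
theorem pvGreedy_dc : ∀ (N : Nat) (nums : List Int) (lo hi : Int) (l : List (Int × Int)),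
    l.length ≤ N →
    l.Pairwise (fun a b => toLex a < toLex b) →
    (∀ p ∈ l, p.1 = pvGetI nums p.2) →
    (∀ j : Int, (∃ v, (v, j) ∈ l) ↔ (lo ≤ j ∧ j < hi)) →
    pvGreedy l ∅ = pvDC nums lo hi := by
  intro N
  induction N with
  | zero =>
    intro nums lo hi l hN hs hv hmem
    have hl : l = [] := List.eq_nil_of_length_eq_zero (Nat.le_zero.mp hN)
    subst hl
    rw [pvDC, if_pos]
    · rfl
    · by_contra h
      obtain ⟨v, hv'⟩ := (hmem lo).mpr ⟨le_refl _, by omega⟩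
      cases hv'
  | succ N ih =>
    intro nums lo hi l hN hs hv hmem
    cases l with
    | nil =>
      rw [pvDC, if_pos]
      · rfl
      · by_contra h
        obtain ⟨v, hv'⟩ := (hmem lo).mpr ⟨le_refl _, by omega⟩
        cases hv'
    | cons p t =>
      obtain ⟨v, i⟩ := p
      have hilo := (hmem i).mp ⟨v, List.mem_cons_self ..⟩
      have hlohi : lo < hi := by omega
      have hbounds := pvArgmin_bounds nums lo hi hlohi
      have hminr : ∀ j : Int, lo ≤ j → j < hi →
          toLex (pvGetI nums (pvArgmin nums lo hi), pvArgmin nums lo hi) ≤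
          toLex (pvGetI nums j, j) := by
        intro j h1 h2
        obtain ⟨_, hmin⟩ := pvFoldMin_spec nums hi (hi - (lo + 1)).toNat (lo + 1) lo rfl (by omega)
        exact hmin j (by omega)
      obtain ⟨w, hwmem⟩ := (hmem (pvArgmin nums lo hi)).mpr ⟨hbounds.1, hbounds.2⟩
      have hw : w = pvGetI nums (pvArgmin nums lo hi) := hv (w, _) hwmem
      have hvv : v = pvGetI nums i := hv (v, i) (List.mem_cons_self ..)
      have hhead : (w, pvArgmin nums lo hi) = (v, i) := by
        rcases List.mem_cons.mp hwmem with h | h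
        · exact h
        · exfalso
          have h1 : toLex (v, i) < toLex (w, pvArgmin nums lo hi) :=
            (List.pairwise_cons.mp hs).1 _ h
          have h2 : toLex (w, pvArgmin nums lo hi) ≤ toLex (v, i) := by
            rw [hw, hvv]
            exact hminr i hilo.1 hilo.2
          exact absurd (lt_of_le_of_lt h2 h1) (lt_irrefl _)
      have hir : i = pvArgmin nums lo hi := (congrArg Prod.snd hhead).symm
      -- one greedy step takes the head
      simp only [pvGreedy]
      rw [if_neg (Finset.notMem_empty i)]
      -- drop the (now dead) pairs at i-1 and i+1 and reset the marks
      rw [pvGreedy_filter (insert (i - 1) (insert i (insert (i + 1) ∅))) t _ (subset_refl _)]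
      rw [pvGreedy_congr (t.filter _) _ ∅ (by
        intro p hp
        have h2 := (List.mem_filter.mp hp).2
        simp only [decide_eq_true_eq] at h2
        simp only [Finset.mem_insert, Finset.notMem_empty, or_false] at h2 ⊢
        tauto)]
      -- split into the two independent sides of i
      have hsplit := pvGreedy_split (fun j => decide (j < i)) (fun j => decide (i < j))
        (by intro x hx; simp only [decide_eq_true_eq] at hx; simp; omega)
        (t.filter (fun p => decide (p.2 ∉ insert (i - 1) (insert i (insert (i + 1) (∅ : Finset Int))))))
        ∅ ∅
        (by
          intro p hp
          have h2 := (List.mem_filter.mp hp).2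
          simp only [decide_eq_true_eq, Finset.mem_insert] at h2
          simp only [decide_eq_true_eq]
          omega)
        (by simp) (by simp)
      rw [Finset.empty_union] at hsplit
      rw [hsplit, List.filter_filter, List.filter_filter]
      -- lengths for the induction hypothesis
      have hNt : t.length ≤ N := by
        simp only [List.length_cons] at hN
        omega
      have htail := (List.pairwise_cons.mp hs).2
      -- left side
      rw [ih nums lo (i - 1) _ (le_trans (List.length_filter_le _ _) hNt)
        (htail.sublist (List.filter_sublist ..))
        (fun p hp => hv p (List.mem_cons_of_mem _ (List.mem_of_mem_filter hp)))
        ?memL]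
      -- right side
      rw [ih nums (i + 2) hi _ (le_trans (List.length_filter_le _ _) hNt)
        (htail.sublist (List.filter_sublist ..))
        (fun p hp => hv p (List.mem_cons_of_mem _ (List.mem_of_mem_filter hp)))
        ?memR]
      -- assemble against one unfolding of pvDC
      · conv_rhs => rw [pvDC]
        rw [if_neg (by omega)]
        show v + (pvDC nums lo (i - 1) + pvDC nums (i + 2) hi) =
          pvGetI nums (pvArgmin nums lo hi) +
            (pvDC nums lo (pvArgmin nums lo hi - 1) + pvDC nums (pvArgmin nums lo hi + 2) hi)
        rw [← hir, hvv]
      case memL =>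
        intro j
        constructor
        · rintro ⟨u, hu⟩
          have h1 := List.mem_filter.mp hu
          simp only [Bool.and_eq_true, decide_eq_true_eq, Finset.mem_insert] at h1
          have h4 := (hmem j).mp ⟨u, List.mem_cons_of_mem _ h1.1⟩
          rcases h1.2 with ⟨hnot, hji⟩
          omega
        · rintro ⟨hj1, hj2⟩
          obtain ⟨u, hu⟩ := (hmem j).mpr ⟨hj1, by omega⟩
          refine ⟨u, ?_⟩
          have hjt : (u, j) ∈ t := by
            rcases List.mem_cons.mp hu with h | h
            · exfalso
              have : j = i := congrArg Prod.snd h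
              omega
            · exact h
          refine List.mem_filter.mpr ⟨hjt, ?_⟩
          simp only [Bool.and_eq_true, decide_eq_true_eq, Finset.mem_insert,
            Finset.notMem_empty, or_false]
          omega
      case memR =>
        intro j
        constructor
        · rintro ⟨u, hu⟩
          have h1 := List.mem_filter.mp hu
          simp only [Bool.and_eq_true, decide_eq_true_eq, Finset.mem_insert] at h1
          have h4 := (hmem j).mp ⟨u, List.mem_cons_of_mem _ h1.1⟩
          rcases h1.2 with ⟨hnot, hji⟩
          omega
        · rintro ⟨hj1, hj2⟩
          obtain ⟨u, hu⟩ := (hmem j).mpr ⟨by omega, hj2⟩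
          refine ⟨u, ?_⟩
          have hjt : (u, j) ∈ t := by
            rcases List.mem_cons.mp hu with h | h
            · exfalso
              have : j = i := congrArg Prod.snd h
              omega
            · exact h
          refine List.mem_filter.mpr ⟨hjt, ?_⟩
          simp only [Bool.and_eq_true, decide_eq_true_eq, Finset.mem_insert,
            Finset.notMem_empty, or_false]
          omega


-- reading a marked slot after a single in-range write
theorem pvGetD_set (marked : List Bool) (k : Nat) (j : Int)
    (hj0 : 0 ≤ j) (hjl : j < (marked.length : Int)) :
    PySem.List.pyGetD (marked.set k true) j false =
      if j = (k : Int) then true else PySem.List.pyGetD marked j false := by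
  rw [PySem.List.pyGetD_eq_getElem _ _ hj0 (by simpa using hjl),
      PySem.List.pyGetD_eq_getElem _ _ hj0 (by simpa using hjl)]
  rw [List.getElem_set]
  split_ifs with h1 h2 h2
  · rfl
  · omega
  · omega
  · rfl

-- A's drain loop is the abstract greedy, with the marked list read as a set of indices
theorem pvDrain_eq_greedy (nums : List Int) (l : List (Int × Int)) :
    ∀ (marked : List Bool) (M : Finset Int) (ans : Int),
    marked.length = nums.length →
    (∀ p ∈ l, 0 ≤ p.2 ∧ p.2 < (nums.length : Int)) →
    (∀ j : Int, 0 ≤ j → j < (nums.length : Int) →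
      (PySem.List.pyGetD marked j false = true ↔ j ∈ M)) →
    pvDrain nums l marked ans = ans + pvGreedy l M := by
  induction l with
  | nil => intro marked M ans _ _ _; simp [pvDrain, pvGreedy]
  | cons p t ih =>
    obtain ⟨v, i⟩ := p
    intro marked M ans hlen hidx hM
    have hi := hidx (v, i) (List.mem_cons_self ..)
    have hidx' : ∀ p ∈ t, 0 ≤ p.2 ∧ p.2 < (nums.length : Int) :=
      fun p hp => hidx p (List.mem_cons_of_mem _ hp)
    rw [pvDrain]
    simp only [pvGreedy]
    by_cases hm : PySem.List.pyGetD marked i false = true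
    · rw [if_neg (by simp [hm]), if_pos ((hM i hi.1 hi.2).mp hm)]
      exact ih marked M ans hlen hidx' hM
    · rw [if_pos (by simp [hm]), if_neg (fun h => hm ((hM i hi.1 hi.2).mpr h))]
      set marked₁ := marked.set i.toNat true with hm₁
      set marked₂ := if 0 ≤ i - 1 then marked₁.set (i - 1).toNat true else marked₁ with hm₂
      set marked₃ := if i + 1 < (nums.length : Int) then marked₂.set (i + 1).toNat true else marked₂ with hm₃
      have hlen₁ : marked₁.length = nums.length := by simp [hm₁, hlen]
      have hlen₂ : marked₂.length = nums.length := by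
        rw [hm₂]; split <;> simp [hlen₁]
      have hlen₃ : marked₃.length = nums.length := by
        rw [hm₃]; split <;> simp [hlen₂]
      rw [ih marked₃ (insert (i - 1) (insert i (insert (i + 1) M))) (ans + v) hlen₃ hidx' ?_]
      · omega
      · intro j hj0 hjn
        have hg₁ : PySem.List.pyGetD marked₁ j false =
            if j = i then true else PySem.List.pyGetD marked j false := by
          rw [hm₁, pvGetD_set marked i.toNat j hj0 (by omega),
              Int.toNat_of_nonneg hi.1]
        have hg₂ : PySem.List.pyGetD marked₂ j false =
            if j = i - 1 then true else PySem.List.pyGetD marked₁ j false := by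
          by_cases hc : 0 ≤ i - 1
          · rw [hm₂, if_pos hc, pvGetD_set marked₁ _ j hj0 (by omega),
                Int.toNat_of_nonneg hc]
          · rw [hm₂, if_neg hc, if_neg (by omega : ¬ j = i - 1)]
        have hg₃ : PySem.List.pyGetD marked₃ j false =
            if j = i + 1 then true else PySem.List.pyGetD marked₂ j false := by
          by_cases hc : i + 1 < (nums.length : Int)
          · rw [hm₃, if_pos hc, pvGetD_set marked₂ _ j hj0 (by omega),
                Int.toNat_of_nonneg (by omega : (0:Int) ≤ i + 1)]
          · rw [hm₃, if_neg hc, if_neg (by omega : ¬ j = i + 1)]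
        have hMe := hM j hj0 hjn
        rw [hg₃, hg₂, hg₁]
        simp only [Finset.mem_insert]
        split_ifs with h1 h2 h3 <;> simp_all


-- B's stack loop sums the divide-and-conquer scores of the stacked segments
theorem pvLoop_eq (nums : List Int) (stack : List (Int × Int)) (ans : Int) :
    pvLoop nums stack ans = ans + (stack.map (fun s => pvDC nums s.1 s.2)).sum := by
  fun_induction pvLoop with
  | case1 ans => simp
  | case2 lo hi rest ans hge ih =>
    simp only [List.map_cons, List.sum_cons]
    rw [ih, pvDC, if_pos hge]
    omega
  | case3 lo hi rest ans hge i ih =>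
    simp only [List.map_cons, List.sum_cons] at ih ⊢
    rw [ih]
    conv_rhs => rw [pvDC]
    rw [if_neg hge]
    show ans + pvGetI nums i + (pvDC nums (i + 2) hi + (pvDC nums lo (i - 1) + _)) =
      ans + (pvGetI nums (pvArgmin nums lo hi) +
        (pvDC nums lo (pvArgmin nums lo hi - 1) + pvDC nums (pvArgmin nums lo hi + 2) hi) + _)
    have hieq : i = pvArgmin nums lo hi := rfl
    rw [← hieq]
    omega
-- ===== VERDICT (by name: the statement is the Claim_ definition above) =====
theorem find_score_spec : Claim_equal_find_score := by
  intro nums _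
  show find_score nums = find_score_alt nums
  unfold find_score find_score_alt
  simp only []
  rw [pvHeap_eq_sorted]
  set base := (PySem.List.enumerate nums 0).map (fun p => (p.2, p.1)) with hbase
  set l := PySem.List.sorted base (fun p => toLex p) false with hl
  have hbase_mem : ∀ p : Int × Int,
      p ∈ base ↔ ∃ (k : Nat) (h : k < nums.length), p = (nums[k], (k : Int)) := by
    intro p
    rw [hbase, List.mem_map]
    constructor
    · rintro ⟨q, hq, rfl⟩
      obtain ⟨k, hk, rfl⟩ := (PySem.List.mem_enumerate_iff _ _ _).mp hq
      exact ⟨k, hk, by simp⟩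
    · rintro ⟨k, hk, rfl⟩
      exact ⟨(0 + (k : Int), nums[k]), (PySem.List.mem_enumerate_iff _ _ _).mpr ⟨k, hk, rfl⟩, by simp⟩
  have hmem_l : ∀ p : Int × Int, p ∈ l ↔ p ∈ base := fun p => PySem.List.mem_sorted ..
  have hv : ∀ p ∈ l, p.1 = pvGetI nums p.2 := by
    intro p hp
    obtain ⟨k, hk, rfl⟩ := (hbase_mem p).mp ((hmem_l p).mp hp)
    show nums[k] = pvGetI nums (k : Int)
    rw [pvGetI, PySem.List.pyGetD_eq_getElem _ _ (by omega) (by simpa using hk)]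
    simp
  have hidx : ∀ p ∈ l, 0 ≤ p.2 ∧ p.2 < (nums.length : Int) := by
    intro p hp
    obtain ⟨k, hk, rfl⟩ := (hbase_mem p).mp ((hmem_l p).mp hp)
    simp only
    omega
  have hmemj : ∀ j : Int, (∃ v, (v, j) ∈ l) ↔ (0 ≤ j ∧ j < (nums.length : Int)) := by
    intro j
    constructor
    · rintro ⟨v, hv'⟩
      obtain ⟨k, hk, heq⟩ := (hbase_mem _).mp ((hmem_l _).mp hv')
      have : j = (k : Int) := congrArg Prod.snd heq
      omega
    · rintro ⟨h0, h1⟩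
      refine ⟨nums[j.toNat]'(by omega), ?_⟩
      apply (hmem_l _).mpr
      apply (hbase_mem _).mpr
      exact ⟨j.toNat, by omega, by simp [Int.toNat_of_nonneg h0]⟩
  have hs : l.Pairwise (fun a b => toLex a < toLex b) := by
    have hle : l.Pairwise (fun a b => (fun p : Int × Int => toLex p) a ≤ (fun p : Int × Int => toLex p) b) :=
      PySem.List.sorted_pairwise ..
    have hnd : l.Nodup := by
      have hbnd : base.Nodup := by
        have hpw := PySem.List.pairwise_lt_enumerate (xs := nums) (s := 0)
        rw [hbase]
        exact List.pairwise_map.mpr (hpw.imp (fun h hEq => (ne_of_lt h) (congrArg Prod.snd hEq)))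
      exact ((PySem.List.sorted_perm ..).nodup_iff).mpr hbnd
    exact (hle.and hnd).imp (fun h => lt_of_le_of_ne h.1 (fun he => h.2 (toLex.injective he)))
  rw [pvDrain_eq_greedy nums l (List.replicate nums.length false) ∅ 0 (by simp) hidx ?hM]
  case hM =>
    intro j hj0 hjn
    rw [PySem.List.pyGetD_eq_getElem _ _ hj0 (by simpa using hjn)]
    simp
  rw [pvGreedy_dc l.length nums 0 (nums.length : Int) l (le_refl _) hs hv hmemj]
  rw [pvLoop_eq]
  simp
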